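-- pv_equiv track=rewrite | github.com/liupengsay/PyIsTheBestLang | src/dp/bag_dp/template.py | two_dimension_limited
-- ===== SOURCE A (Python) =====
-- def two_dimension_limited(m, n, nums):
--     # 2D 01 backpack
--     dp = [[0] * (n + 1) for _ in range(m + 1)]
--     dp[0][0] = 1
--     for a, b in nums:
--         for i in range(m, a - 1, -1):
--             for j in range(n, b - 1, -1):
--                 dp[i][j] += dp[i - a][j - b]
--     return dp[m][n]
-- ===== SOURCE B (Python) =====
-- def two_dimension_limited(m, n, nums):
--     # Top-down recurrence f(k, i, j) = number of subsets of nums[:k] with sums exactly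
--     # (i, j), evaluated demand-driven in two staged passes: a backward needs-analysis
--     # collecting, per prefix length k, only the states reachable from the query (m, n),
--     # then a forward value pass over exactly those states. Returns f(len(nums), m, n).
--     levels = [{(m, n)}]
--     for a, b in reversed(nums):
--         cur = levels[-1]
--         prev = set(cur)
--         for i, j in cur:
--             if a <= i and b <= j:
--                 prev.add((i - a, j - b))
--         levels.append(prev)
--     levels.reverse()
--     memo = {q: (1 if q == (0, 0) else 0) for q in levels[0]}
--     for (a, b), states in zip(nums, levels[1:]):
--         nxt = {}
--         for i, j in states:
--             v = memo[(i, j)]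
--             if a <= i and b <= j:
--                 v += memo[(i - a, j - b)]
--             nxt[(i, j)] = v
--         memo = nxt
--     return memo[(m, n)]
-- ===== Notes on version B (the rewrite author's own statement) =====
-- stated objective: alternative
-- what changed: Replaced the bottom-up dense (m+1)x(n+1) table swept in place with reversed index loops per item by a demand-driven top-down evaluation of the recurrence f(k,i,j) = #subsets of nums[:k] with sums (i,j): a backward needs-analysis pass collects, per prefix length, only the states reachable from the query (m,n), then a forward value pass evaluates the recurrence over exactly those states.
import Mathlib
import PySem

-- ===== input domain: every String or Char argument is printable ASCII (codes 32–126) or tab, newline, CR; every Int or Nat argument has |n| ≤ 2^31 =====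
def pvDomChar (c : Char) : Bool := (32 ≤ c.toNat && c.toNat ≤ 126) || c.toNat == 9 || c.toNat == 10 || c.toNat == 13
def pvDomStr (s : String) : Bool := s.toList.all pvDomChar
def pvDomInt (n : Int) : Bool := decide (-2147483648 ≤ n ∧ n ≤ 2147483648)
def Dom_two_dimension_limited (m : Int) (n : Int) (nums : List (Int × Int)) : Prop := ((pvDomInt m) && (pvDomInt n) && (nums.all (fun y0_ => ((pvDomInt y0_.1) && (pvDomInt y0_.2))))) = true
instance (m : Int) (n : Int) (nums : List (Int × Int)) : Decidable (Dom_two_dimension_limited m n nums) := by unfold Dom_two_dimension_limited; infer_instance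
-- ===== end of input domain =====

-- B replaces A's bottom-up dense table (reversed in-place sweeps per item) by a demand-driven
-- top-down evaluation of f(k,i,j) = #subsets of nums[:k] with sums (i,j): a backward
-- needs-analysis pass collecting the states reachable from the query (m,n), then a forward
-- value pass over exactly those states (objective: alternative).

-- ===== PORT A =====
-- dp[i][j] read / write helpers; exact via .toNat because under Pre_ every index actually
-- accessed is nonnegative and in range (on any other index Python raises IndexError).
def pvGet2 (dp : List (List Int)) (i j : Int) : Int := (dp.getD i.toNat []).getD j.toNat 0

def pvSet2 (dp : List (List Int)) (i j : Int) (v : Int) : List (List Int) :=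
  dp.set i.toNat ((dp.getD i.toNat []).set j.toNat v)

def two_dimension_limited (m : Int) (n : Int) (nums : List (Int × Int)) : Int :=
  -- dp = [[0] * (n + 1) for _ in range(m + 1)]; dp[0][0] = 1
  let dp0 : List (List Int) := List.replicate (m + 1).toNat (List.replicate (n + 1).toNat 0)
  let dp1 := pvSet2 dp0 0 0 1
  -- for a, b in nums: for i in range(m, a-1, -1): for j in range(n, b-1, -1): dp[i][j] += dp[i-a][j-b]
  let dp := nums.foldl (fun dp ab =>
    (PySem.List.pyRange m (ab.1 - 1) (-1)).foldl (fun dp i =>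
      (PySem.List.pyRange n (ab.2 - 1) (-1)).foldl (fun dp j =>
        pvSet2 dp i j (pvGet2 dp i j + pvGet2 dp (i - ab.1) (j - ab.2))) dp) dp) dp1
  pvGet2 dp m n

-- ===== PORT B =====
-- one needs-analysis step: prev = set(cur); for i, j in cur: if a <= i and b <= j: prev.add((i-a, j-b))
def pvExpand (s : PySem.Set (Int × Int)) (ab : Int × Int) : PySem.Set (Int × Int) :=
  s.foldl (fun prev q =>
      if ab.1 ≤ q.1 ∧ ab.2 ≤ q.2 then PySem.Set.add prev (q.1 - ab.1, q.2 - ab.2) else prev)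
    (PySem.Set.ofList s)

def two_dimension_limited_alt (m : Int) (n : Int) (nums : List (Int × Int)) : Int :=
  -- levels = [{(m, n)}]; for a, b in reversed(nums): levels.append(expand(levels[-1])).
  -- Built here by consing, which leaves the list directly in the order Python's final
  -- levels.reverse() produces (level 0 first).
  let levels : List (PySem.Set (Int × Int)) :=
    nums.reverse.foldl (fun acc ab => pvExpand (acc.headD PySem.Set.empty) ab :: acc)
      [PySem.Set.ofList [(m, n)]]
  -- memo = {q: (1 if q == (0, 0) else 0) for q in levels[0]}
  let memo0 : PySem.Dict (Int × Int) Int :=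
    (levels.headD PySem.Set.empty).foldl
      (fun d q => d.insert q (if q = (0, 0) then 1 else 0)) PySem.Dict.empty
  -- for (a, b), states in zip(nums, levels[1:]): nxt = {}; for i, j in states: …; memo = nxt
  -- Python's memo[(i, j)] / memo[(i-a, j-b)] lookups are ported as getD _ 0: those keys are
  -- always present (each level contains the next level and its taken-shifts), so this is exact.
  let memo := (nums.zip levels.tail).foldl (fun memo p =>
      p.2.foldl (fun nxt q =>
        let v := memo.getD q 0
        let v := if p.1.1 ≤ q.1 ∧ p.1.2 ≤ q.2 then v + memo.getD (q.1 - p.1.1, q.2 - p.1.2) 0 else v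
        nxt.insert q v) PySem.Dict.empty) memo0
  -- return memo[(m, n)]  (always present, see above)
  memo.getD (m, n) 0

-- ===== PRECONDITION & SPEC =====
-- Pre_ is exactly where A returns: A raises IndexError when m < 0 or n < 0 (dp[0][0] on an
-- empty table) and when some item has a negative coordinate while both loop ranges are
-- nonempty (dp[i-a] resp. dp[i][j-b] then indexes past the end of the table).
def Pre_two_dimension_limited (m : Int) (n : Int) (nums : List (Int × Int)) : Prop :=
  0 ≤ m ∧ 0 ≤ n ∧ ∀ p ∈ nums, (0 ≤ p.1 ∧ 0 ≤ p.2) ∨ m < p.1 ∨ n < p.2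
instance (m : Int) (n : Int) (nums : List (Int × Int)) : Decidable (Pre_two_dimension_limited m n nums) := by unfold Pre_two_dimension_limited; infer_instance

def pvWitness_two_dimension_limited : Int × Int × (List (Int × Int)) := (2, 2, [(1, 1), (2, 0), (1, 5)])

def Spec_two_dimension_limited (m : Int) (n : Int) (nums : List (Int × Int)) (out : Int) : Prop := out = two_dimension_limited_alt m n nums
instance (m : Int) (n : Int) (nums : List (Int × Int)) (out : Int) : Decidable (Spec_two_dimension_limited m n nums out) := by unfold Spec_two_dimension_limited; infer_instance

-- ===== CLAIM (what is proved, stated in full; the proofs are below) =====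
def Claim_equal_two_dimension_limited : Prop := ∀ (m : Int) (n : Int) (nums : List (Int × Int)), Dom_two_dimension_limited m n nums → Pre_two_dimension_limited m n nums → Spec_two_dimension_limited m n nums (two_dimension_limited m n nums)


-- ===== LEMMAS AND PROOFS =====

-- A-side model: per-item update with the (i ≤ m, j ≤ n) box condition of A's loops.
def pvBoxIf (m n : Int) (g : Int × Int → Int) (ab : Int × Int) : Int × Int → Int :=
  fun q => g q + (if q.1 ≤ m ∧ q.2 ≤ n then g (q.1 - ab.1, q.2 - ab.2) else 0)

-- B-side model: per-item update gated by the recurrence's take condition a ≤ i, b ≤ j.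
def pvStep (g : Int × Int → Int) (ab : Int × Int) : Int × Int → Int :=
  fun q => g q + (if ab.1 ≤ q.1 ∧ ab.2 ≤ q.2 then g (q.1 - ab.1, q.2 - ab.2) else 0)

def pvInit : Int × Int → Int := fun q => if q = (0, 0) then 1 else 0

def pvShape (m n : Int) (dp : List (List Int)) : Prop :=
  dp.length = (m + 1).toNat ∧ ∀ row ∈ dp, row.length = (n + 1).toNat

def pvVanish (m n : Int) (g : Int × Int → Int) : Prop :=
  ∀ q : Int × Int, ¬(0 ≤ q.1 ∧ q.1 ≤ m ∧ 0 ≤ q.2 ∧ q.2 ≤ n) → g q = 0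

-- a Pre_-admissible item
def pvOk (m n : Int) (ab : Int × Int) : Prop := (0 ≤ ab.1 ∧ 0 ≤ ab.2) ∨ m < ab.1 ∨ n < ab.2

theorem pv_getD_set_self {α : Type} (l : List α) (k : Nat) (h : k < l.length) (d v : α) :
    (l.set k v).getD k d = v := by
  simp [List.getD_eq_getElem?_getD, List.getElem?_set_self h]

theorem pv_getD_set_ne {α : Type} (l : List α) {k k' : Nat} (h : k ≠ k') (d : α) (v : α) :
    (l.set k v).getD k' d = l.getD k' d := by
  simp [List.getD_eq_getElem?_getD, List.getElem?_set_ne h]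

theorem pv_shape_set2 {m n : Int} {dp : List (List Int)} (h : pvShape m n dp) (i j v) :
    pvShape m n (pvSet2 dp i j v) := by
  obtain ⟨h1, h2⟩ := h
  refine ⟨by simpa [pvSet2] using h1, ?_⟩
  intro row hrow
  by_cases hlt : i.toNat < dp.length
  · rcases List.mem_or_eq_of_mem_set hrow with h | h
    · exact h2 _ h
    · subst h
      rw [List.length_set]
      exact h2 _ (List.getD_eq_getElem dp [] hlt ▸ dp.getElem_mem hlt)
  · rw [pvSet2, List.set_eq_of_length_le (by omega)] at hrow
    exact h2 _ hrow

theorem pv_get2_set2 {m n : Int} {dp : List (List Int)} (h : pvShape m n dp)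
    (hm : 0 ≤ m) (hn : 0 ≤ n) {i j : Int} (hi : 0 ≤ i) (him : i ≤ m) (hj : 0 ≤ j) (hjn : j ≤ n)
    (v : Int) {i' j' : Int} (hi' : 0 ≤ i') (hj' : 0 ≤ j') :
    pvGet2 (pvSet2 dp i j v) i' j' = if i' = i ∧ j' = j then v else pvGet2 dp i' j' := by
  obtain ⟨h1, h2⟩ := h
  have hlen : i.toNat < dp.length := by rw [h1]; omega
  have hrowlen : (dp.getD i.toNat []).length = (n + 1).toNat := by
    exact h2 _ (List.getD_eq_getElem dp [] hlen ▸ dp.getElem_mem hlen)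
  have hjlen : j.toNat < (dp.getD i.toNat []).length := by rw [hrowlen]; omega
  by_cases hii : i' = i
  · subst hii
    rw [pvGet2, pvSet2, pv_getD_set_self _ _ hlen]
    by_cases hjj : j' = j
    · subst hjj
      rw [pv_getD_set_self _ _ hjlen]
      simp
    · rw [pv_getD_set_ne _ (by omega)]
      simp [hjj, pvGet2]
  · rw [pvGet2, pvSet2, pv_getD_set_ne _ (by omega : i.toNat ≠ i'.toNat)]
    simp [hii, pvGet2]

-- A's innermost loop (one row i, j counting down from J to b): each cell of row i gets
-- the pre-loop value of the cell (i-a, j-b) added exactly once.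
theorem pv_inner_fold {m n a b i : Int} (hm : 0 ≤ m) (hn : 0 ≤ n)
    (ha : 0 ≤ a) (hb : 0 ≤ b) (hia : a ≤ i) (him : i ≤ m) :
    ∀ (t : Nat) (J : Int), J = b - 1 + t → J ≤ n → ∀ dp, pvShape m n dp →
      pvShape m n ((PySem.List.pyRange J (b - 1) (-1)).foldl
        (fun dp j => pvSet2 dp i j (pvGet2 dp i j + pvGet2 dp (i - a) (j - b))) dp) ∧
      ∀ i' j' : Int, 0 ≤ i' → 0 ≤ j' →
        pvGet2 ((PySem.List.pyRange J (b - 1) (-1)).foldl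
          (fun dp j => pvSet2 dp i j (pvGet2 dp i j + pvGet2 dp (i - a) (j - b))) dp) i' j'
        = pvGet2 dp i' j' + (if i' = i ∧ b ≤ j' ∧ j' ≤ J then pvGet2 dp (i' - a) (j' - b) else 0) := by
  intro t
  induction t with
  | zero =>
    intro J hJ _ dp hsh
    rw [PySem.List.pyRange_neg_one_eq_nil (by omega)]
    refine ⟨hsh, ?_⟩
    intro i' j' _ _
    simp only [List.foldl_nil]
    rw [if_neg (by omega)]
    ring
  | succ t ih =>
    intro J hJ hJn dp hsh
    rw [PySem.List.pyRange_neg_one_cons (by omega)]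
    simp only [List.foldl_cons]
    set dp1 := pvSet2 dp i J (pvGet2 dp i J + pvGet2 dp (i - a) (J - b)) with hdp1
    have hsh1 : pvShape m n dp1 := pv_shape_set2 hsh _ _ _
    have hbJ : b ≤ J := by omega
    have hg1 : ∀ i' j' : Int, 0 ≤ i' → 0 ≤ j' →
        pvGet2 dp1 i' j' = if i' = i ∧ j' = J then pvGet2 dp i J + pvGet2 dp (i - a) (J - b)
          else pvGet2 dp i' j' := by
      intro i' j' h1 h2
      exact pv_get2_set2 hsh hm hn (by omega) him (by omega) hJn _ h1 h2
    obtain ⟨hshr, hr⟩ := ih (J - 1) (by omega) (by omega) dp1 hsh1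
    refine ⟨hshr, ?_⟩
    intro i' j' hi' hj'
    rw [hr i' j' hi' hj']
    by_cases hc : i' = i ∧ b ≤ j' ∧ j' ≤ J - 1
    · rw [if_pos hc, if_pos (by omega), hg1 i' j' hi' hj', if_neg (by omega),
        hg1 _ _ (by omega) (by omega), if_neg (by rintro ⟨he1, he2⟩; omega)]
    · rw [if_neg hc, hg1 i' j' hi' hj']
      by_cases hd : i' = i ∧ j' = J
      · rw [if_pos hd, if_pos (by omega)]
        obtain ⟨rfl, rfl⟩ := hd
        ring
      · rw [if_neg hd, if_neg (by omega)]

-- A's two nested loops for one item, rows counting down from I to a.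
theorem pv_outer_fold {m n a b : Int} (hm : 0 ≤ m) (hn : 0 ≤ n)
    (ha : 0 ≤ a) (hb : 0 ≤ b) (hbn : b ≤ n) :
    ∀ (t : Nat) (I : Int), I = a - 1 + t → I ≤ m → ∀ dp, pvShape m n dp →
      pvShape m n ((PySem.List.pyRange I (a - 1) (-1)).foldl
        (fun dp i => (PySem.List.pyRange n (b - 1) (-1)).foldl
          (fun dp j => pvSet2 dp i j (pvGet2 dp i j + pvGet2 dp (i - a) (j - b))) dp) dp) ∧
      ∀ i' j' : Int, 0 ≤ i' → 0 ≤ j' →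
        pvGet2 ((PySem.List.pyRange I (a - 1) (-1)).foldl
          (fun dp i => (PySem.List.pyRange n (b - 1) (-1)).foldl
            (fun dp j => pvSet2 dp i j (pvGet2 dp i j + pvGet2 dp (i - a) (j - b))) dp) dp) i' j'
        = pvGet2 dp i' j' + (if a ≤ i' ∧ i' ≤ I ∧ b ≤ j' ∧ j' ≤ n then pvGet2 dp (i' - a) (j' - b) else 0) := by
  intro t
  induction t with
  | zero =>
    intro I hI _ dp hsh
    rw [show PySem.List.pyRange I (a - 1) (-1) = [] from PySem.List.pyRange_neg_one_eq_nil (by omega)]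
    refine ⟨hsh, ?_⟩
    intro i' j' _ _
    simp only [List.foldl_nil]
    rw [if_neg (by omega)]
    ring
  | succ t ih =>
    intro I hI hIm dp hsh
    rw [show PySem.List.pyRange I (a - 1) (-1) = I :: PySem.List.pyRange (I - 1) (a - 1) (-1) from
      PySem.List.pyRange_neg_one_cons (by omega)]
    simp only [List.foldl_cons]
    have haI : a ≤ I := by omega
    obtain ⟨hsh1, hg1⟩ := pv_inner_fold hm hn ha hb haI hIm (n - (b - 1)).toNat n (by omega) (by omega) dp hsh
    set dp1 := (PySem.List.pyRange n (b - 1) (-1)).foldl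
      (fun dp j => pvSet2 dp I j (pvGet2 dp I j + pvGet2 dp (I - a) (j - b))) dp with hdp1
    obtain ⟨hshr, hr⟩ := ih (I - 1) (by omega) (by omega) dp1 hsh1
    refine ⟨hshr, ?_⟩
    intro i' j' hi' hj'
    rw [hr i' j' hi' hj']
    by_cases hc : a ≤ i' ∧ i' ≤ I - 1 ∧ b ≤ j' ∧ j' ≤ n
    · rw [if_pos hc, if_pos (by omega), hg1 i' j' hi' hj', if_neg (by omega),
        hg1 _ _ (by omega) (by omega), if_neg (by rintro ⟨he1, he2⟩; omega)]
      ring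
    · rw [if_neg hc, hg1 i' j' hi' hj']
      by_cases hd : i' = I ∧ b ≤ j' ∧ j' ≤ n
      · rw [if_pos hd, if_pos (by omega)]
        obtain ⟨rfl, -, -⟩ := hd
        ring
      · rw [if_neg hd, if_neg (by omega)]
        ring

theorem pv_vanish_step {m n : Int} {g : Int × Int → Int} {ab : Int × Int}
    (hok : pvOk m n ab) (hv : pvVanish m n g) :
    pvVanish m n (pvBoxIf m n g ab) := by
  intro q hq
  show g q + _ = 0
  rw [hv q hq]
  split_ifs with h
  · have hz : g (q.1 - ab.1, q.2 - ab.2) = 0 := by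
      apply hv
      intro hc
      obtain ⟨c1, c2, c3, c4⟩ := hc
      simp only at c1 c2 c3 c4
      rcases hok with ⟨h1, h2⟩ | h1 | h1 <;> omega
    rw [hz]
    norm_num
  · norm_num

-- the per-item effect of A's two nested reversed loops, for any Pre_-admissible item
theorem pv_item {m n : Int} {ab : Int × Int} (hm : 0 ≤ m) (hn : 0 ≤ n) (hok : pvOk m n ab)
    (dp : List (List Int)) (hsh : pvShape m n dp) :
    pvShape m n ((PySem.List.pyRange m (ab.1 - 1) (-1)).foldl
      (fun dp i => (PySem.List.pyRange n (ab.2 - 1) (-1)).foldl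
        (fun dp j => pvSet2 dp i j (pvGet2 dp i j + pvGet2 dp (i - ab.1) (j - ab.2))) dp) dp) ∧
    ∀ i' j' : Int, 0 ≤ i' → 0 ≤ j' →
      pvGet2 ((PySem.List.pyRange m (ab.1 - 1) (-1)).foldl
        (fun dp i => (PySem.List.pyRange n (ab.2 - 1) (-1)).foldl
          (fun dp j => pvSet2 dp i j (pvGet2 dp i j + pvGet2 dp (i - ab.1) (j - ab.2))) dp) dp) i' j'
      = pvGet2 dp i' j' + (if ab.1 ≤ i' ∧ i' ≤ m ∧ ab.2 ≤ j' ∧ j' ≤ n then pvGet2 dp (i' - ab.1) (j' - ab.2) else 0) := by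
  obtain ⟨a, b⟩ := ab
  dsimp only at *
  by_cases ham : m < a
  · rw [show PySem.List.pyRange m (a - 1) (-1) = [] from PySem.List.pyRange_neg_one_eq_nil (by omega)]
    refine ⟨hsh, ?_⟩
    intro i' j' _ _
    simp only [List.foldl_nil]
    rw [if_neg (by omega)]
    ring
  · by_cases hbn : n < b
    · have hnil : PySem.List.pyRange n (b - 1) (-1) = [] := PySem.List.pyRange_neg_one_eq_nil (by omega)
      rw [hnil]
      simp only [List.foldl_nil, List.foldl_fixed]
      refine ⟨hsh, ?_⟩
      intro i' j' _ _
      rw [if_neg (by omega)]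
      ring
    · have ha : 0 ≤ a := by rcases hok with ⟨h1, h2⟩ | h | h <;> omega
      have hb : 0 ≤ b := by rcases hok with ⟨h1, h2⟩ | h | h <;> omega
      obtain ⟨hshr, hr⟩ := pv_outer_fold hm hn ha hb (by omega) (m - (a - 1)).toNat m (by omega) le_rfl dp hsh
      refine ⟨hshr, ?_⟩
      intro i' j' hi' hj'
      rw [hr i' j' hi' hj']

-- A's whole item loop tracks the model fold on every cell of the table.
theorem pv_a_side {m n : Int} (hm : 0 ≤ m) (hn : 0 ≤ n) :
    ∀ (nums : List (Int × Int)) (dp : List (List Int)) (g : Int × Int → Int),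
      (∀ p ∈ nums, pvOk m n p) → pvShape m n dp → pvVanish m n g →
      (∀ i j : Int, 0 ≤ i → i ≤ m → 0 ≤ j → j ≤ n → pvGet2 dp i j = g (i, j)) →
      ∀ i j : Int, 0 ≤ i → i ≤ m → 0 ≤ j → j ≤ n →
        pvGet2 (nums.foldl (fun dp ab =>
          (PySem.List.pyRange m (ab.1 - 1) (-1)).foldl (fun dp i =>
            (PySem.List.pyRange n (ab.2 - 1) (-1)).foldl (fun dp j =>
              pvSet2 dp i j (pvGet2 dp i j + pvGet2 dp (i - ab.1) (j - ab.2))) dp) dp) dp) i j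
        = (nums.foldl (pvBoxIf m n) g) (i, j) := by
  intro nums
  induction nums with
  | nil => intro dp g _ _ _ hcell i j h1 h2 h3 h4; exact hcell i j h1 h2 h3 h4
  | cons ab rest ih =>
    intro dp g hoks hsh hv hcell i j h1 h2 h3 h4
    simp only [List.foldl_cons]
    obtain ⟨hsh1, hstep⟩ := pv_item hm hn (hoks ab List.mem_cons_self) dp hsh
    refine ih _ _ (fun p hp => hoks p (List.mem_cons_of_mem _ hp))
      hsh1 (pv_vanish_step (hoks ab List.mem_cons_self) hv) ?_ i j h1 h2 h3 h4
    intro i' j' g1 g2 g3 g4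
    rw [hstep i' j' g1 g3, hcell i' j' g1 g2 g3 g4]
    simp only [pvBoxIf]
    rw [if_pos (show i' ≤ m ∧ j' ≤ n from ⟨g2, g4⟩)]
    rcases hoks ab List.mem_cons_self with ⟨ha, hb⟩ | h | h
    · by_cases hg : ab.1 ≤ i' ∧ ab.2 ≤ j'
      · rw [if_pos (show ab.1 ≤ i' ∧ i' ≤ m ∧ ab.2 ≤ j' ∧ j' ≤ n by omega),
          hcell _ _ (by omega) (by omega) (by omega) (by omega)]
      · rw [if_neg (show ¬(ab.1 ≤ i' ∧ i' ≤ m ∧ ab.2 ≤ j' ∧ j' ≤ n) by omega),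
          hv (i' - ab.1, j' - ab.2) (by intro hc; obtain ⟨c1, c2, c3, c4⟩ := hc; simp only at c1 c2 c3 c4; omega)]
    · rw [if_neg (show ¬(ab.1 ≤ i' ∧ i' ≤ m ∧ ab.2 ≤ j' ∧ j' ≤ n) by omega),
        hv (i' - ab.1, j' - ab.2) (by intro hc; obtain ⟨c1, c2, c3, c4⟩ := hc; simp only at c1 c2 c3 c4; omega)]
    · rw [if_neg (show ¬(ab.1 ≤ i' ∧ i' ≤ m ∧ ab.2 ≤ j' ∧ j' ≤ n) by omega),
        hv (i' - ab.1, j' - ab.2) (by intro hc; obtain ⟨c1, c2, c3, c4⟩ := hc; simp only at c1 c2 c3 c4; omega)]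

theorem pv_getD_replicate {α : Type} (nn : Nat) (a : α) (i : Nat) (d : α) :
    (List.replicate nn a).getD i d = if i < nn then a else d := by
  split_ifs with h
  · rw [List.getD_eq_getElem _ _ (by simpa using h), List.getElem_replicate]
  · rw [List.getD_eq_default _ _ (by simpa using h)]

theorem pv_shape_zeros {m n : Int} :
    pvShape m n (List.replicate (m + 1).toNat (List.replicate (n + 1).toNat 0)) := by
  refine ⟨by simp, ?_⟩
  intro row hrow
  rw [List.eq_of_mem_replicate hrow]
  simp

theorem pv_get2_zeros {m n : Int} (i j : Int) :
    pvGet2 (List.replicate (m + 1).toNat (List.replicate (n + 1).toNat 0)) i j = 0 := by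
  unfold pvGet2
  rw [pv_getD_replicate]
  split_ifs with h
  · rw [pv_getD_replicate]
    split_ifs <;> rfl
  · simp [List.getD]

theorem pv_dp1_cells {m n : Int} (hm : 0 ≤ m) (hn : 0 ≤ n) (i j : Int)
    (h1 : 0 ≤ i) (_h2 : i ≤ m) (h3 : 0 ≤ j) (_h4 : j ≤ n) :
    pvGet2 (pvSet2 (List.replicate (m + 1).toNat (List.replicate (n + 1).toNat 0)) 0 0 1) i j
      = pvInit (i, j) := by
  rw [pv_get2_set2 pv_shape_zeros hm hn le_rfl hm le_rfl hn 1 h1 h3, pv_get2_zeros]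
  unfold pvInit
  by_cases hc : i = 0 ∧ j = 0
  · rw [if_pos hc, if_pos (by rw [Prod.ext_iff]; exact ⟨by simp [hc.1], by simp [hc.2]⟩)]
  · rw [if_neg hc, if_neg (by rw [Prod.ext_iff]; simp only; rintro ⟨ha, hb⟩; exact hc ⟨ha, hb⟩)]

-- ---- bridge: A's boxed fold equals B's gated fold on the box, for Pre_-admissible items ----

theorem pv_vanish_fold {m n : Int} :
    ∀ (l : List (Int × Int)) (g : Int × Int → Int), (∀ p ∈ l, pvOk m n p) → pvVanish m n g →
      pvVanish m n (l.foldl (pvBoxIf m n) g) := by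
  intro l
  induction l with
  | nil => intro g _ hv; exact hv
  | cons ab rest ih =>
    intro g hoks hv
    exact ih _ (fun p hp => hoks p (List.mem_cons_of_mem _ hp))
      (pv_vanish_step (hoks ab List.mem_cons_self) hv)

theorem pv_bridge {m n : Int} (hm : 0 ≤ m) (hn : 0 ≤ n) :
    ∀ (l : List (Int × Int)), (∀ p ∈ l, pvOk m n p) →
      ∀ q : Int × Int, 0 ≤ q.1 → q.1 ≤ m → 0 ≤ q.2 → q.2 ≤ n →
        l.foldl (pvBoxIf m n) pvInit q = l.foldl pvStep pvInit q := by
  intro l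
  induction l using List.reverseRecOn with
  | nil => intro _ q _ _ _ _; rfl
  | append_singleton l ab ih =>
    intro hoks q h1 h2 h3 h4
    have hoks' : ∀ p ∈ l, pvOk m n p := fun p hp => hoks p (List.mem_append_left _ hp)
    have hok : pvOk m n ab := hoks ab (List.mem_append_right _ List.mem_cons_self)
    rw [List.foldl_append, List.foldl_append]
    simp only [List.foldl_cons, List.foldl_nil]
    show (l.foldl (pvBoxIf m n) pvInit) q + _ = (l.foldl pvStep pvInit) q + _
    rw [if_pos (show q.1 ≤ m ∧ q.2 ≤ n from ⟨h2, h4⟩), ih hoks' q h1 h2 h3 h4]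
    congr 1
    by_cases hg : ab.1 ≤ q.1 ∧ ab.2 ≤ q.2
    · rw [if_pos hg]
      obtain ⟨hg1, hg2⟩ := hg
      have hab : 0 ≤ ab.1 ∧ 0 ≤ ab.2 := by
        rcases hok with h | h | h
        · exact h
        · omega
        · omega
      exact ih hoks' (q.1 - ab.1, q.2 - ab.2) (by simp only; omega) (by simp only; omega)
        (by simp only; omega) (by simp only; omega)
    · rw [if_neg hg]
      apply pv_vanish_fold l pvInit hoks'
        (by intro q' hq'; unfold pvInit; rw [if_neg]; intro he; apply hq'; rw [he]; exact ⟨le_rfl, hm, le_rfl, hn⟩)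
      intro hc
      obtain ⟨c1, c2, c3, c4⟩ := hc
      simp only at c1 c2 c3 c4
      omega

-- ---- B side: the demand levels and the value pass realise the gated fold ----

-- model of B's needs-analysis result, level 0 first
def pvLevels (mn : Int × Int) : List (Int × Int) → List (PySem.Set (Int × Int))
  | [] => [PySem.Set.ofList [mn]]
  | ab :: rest => pvExpand ((pvLevels mn rest).headD PySem.Set.empty) ab :: pvLevels mn rest

theorem pv_levels_ne_nil (mn : Int × Int) (nums : List (Int × Int)) :
    ∃ h t, pvLevels mn nums = h :: t := by
  cases nums with
  | nil => exact ⟨_, _, rfl⟩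
  | cons ab rest => exact ⟨_, _, rfl⟩

theorem pv_levels_eq (mn : Int × Int) (nums : List (Int × Int)) :
    nums.reverse.foldl (fun acc ab => pvExpand (acc.headD PySem.Set.empty) ab :: acc)
      [PySem.Set.ofList [mn]] = pvLevels mn nums := by
  rw [List.foldl_reverse]
  induction nums with
  | nil => rfl
  | cons ab rest ih => rw [List.foldr_cons, ih]; rfl

-- membership monotonicity of the conditional-add loop
theorem pv_mem_foldl_addIf {ab : Int × Int} {q : Int × Int} :
    ∀ (l : List (Int × Int)) (s : PySem.Set (Int × Int)), q ∈ s →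
      q ∈ l.foldl (fun prev q' =>
        if ab.1 ≤ q'.1 ∧ ab.2 ≤ q'.2 then PySem.Set.add prev (q'.1 - ab.1, q'.2 - ab.2) else prev) s := by
  intro l
  induction l with
  | nil => intro s h; exact h
  | cons x rest ih =>
    intro s h
    simp only [List.foldl_cons]
    split_ifs with hc
    · exact ih _ ((PySem.Set.mem_add _ _ _).mpr (Or.inl h))
    · exact ih _ h

theorem pv_mem_expand_self {s : PySem.Set (Int × Int)} {ab q : Int × Int} (h : q ∈ s) :
    q ∈ pvExpand s ab :=
  pv_mem_foldl_addIf s _ ((PySem.Set.mem_ofList _ _).mpr h)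

theorem pv_mem_expand_shift {ab : Int × Int} :
    ∀ (l : List (Int × Int)) (s : PySem.Set (Int × Int)) (q : Int × Int), q ∈ l →
      ab.1 ≤ q.1 → ab.2 ≤ q.2 →
      (q.1 - ab.1, q.2 - ab.2) ∈ l.foldl (fun prev q' =>
        if ab.1 ≤ q'.1 ∧ ab.2 ≤ q'.2 then PySem.Set.add prev (q'.1 - ab.1, q'.2 - ab.2) else prev) s := by
  intro l
  induction l with
  | nil => intro s q h; exact absurd h (List.not_mem_nil)
  | cons x rest ih =>
    intro s q hq h1 h2
    simp only [List.foldl_cons]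
    rcases List.mem_cons.mp hq with rfl | hq'
    · rw [if_pos ⟨h1, h2⟩]
      exact pv_mem_foldl_addIf rest _ ((PySem.Set.mem_add _ _ _).mpr (Or.inr rfl))
    · split_ifs with hc
      · exact ih _ q hq' h1 h2
      · exact ih _ q hq' h1 h2

theorem pv_mem_expand_shift' {s : PySem.Set (Int × Int)} {ab q : Int × Int}
    (h : q ∈ s) (h1 : ab.1 ≤ q.1) (h2 : ab.2 ≤ q.2) :
    (q.1 - ab.1, q.2 - ab.2) ∈ pvExpand s ab :=
  pv_mem_expand_shift s _ q h h1 h2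

-- a loop inserting q ↦ F q for each q in a list builds a dict computing F on that list
theorem pv_dict_build (F : Int × Int → Int) :
    ∀ (l : List (Int × Int)) (d : PySem.Dict (Int × Int) Int) (k : Int × Int),
      (l.foldl (fun nxt q => nxt.insert q (F q)) d).getD k 0
        = if k ∈ l then F k else d.getD k 0 := by
  intro l
  induction l with
  | nil => intro d k; simp
  | cons q rest ih =>
    intro d k
    simp only [List.foldl_cons]
    rw [ih]
    by_cases hk : k ∈ rest
    · rw [if_pos hk, if_pos (List.mem_cons_of_mem _ hk)]
    · rw [if_neg hk, PySem.Dict.getD_insert]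
      by_cases he : k = q
      · subst he
        rw [if_pos rfl, if_pos List.mem_cons_self]
      · rw [if_neg he, if_neg (by simp [he, hk])]

-- B's value pass over the demand levels computes the gated fold at the query point
theorem pv_b_value (mn : Int × Int) :
    ∀ (nums : List (Int × Int)) (g : Int × Int → Int) (memo : PySem.Dict (Int × Int) Int),
      (∀ q ∈ (pvLevels mn nums).headD PySem.Set.empty, memo.getD q 0 = g q) →
      ((nums.zip (pvLevels mn nums).tail).foldl (fun memo p =>
          p.2.foldl (fun nxt q =>
            nxt.insert q (if p.1.1 ≤ q.1 ∧ p.1.2 ≤ q.2 then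
              memo.getD q 0 + memo.getD (q.1 - p.1.1, q.2 - p.1.2) 0 else memo.getD q 0))
            PySem.Dict.empty) memo).getD mn 0
        = (nums.foldl pvStep g) mn := by
  intro nums
  induction nums with
  | nil =>
    intro g memo hmemo
    exact hmemo mn (by simp only [pvLevels, List.headD_cons]; exact (PySem.Set.mem_ofList _ _).mpr List.mem_cons_self)
  | cons ab rest ih =>
    intro g memo hmemo
    obtain ⟨h, t, hL⟩ := pv_levels_ne_nil mn rest
    simp only [pvLevels, List.tail_cons, hL, List.zip_cons_cons, List.foldl_cons]
    have hhead : (pvLevels mn (ab :: rest)).headD PySem.Set.empty = pvExpand ((pvLevels mn rest).headD PySem.Set.empty) ab := by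
      simp [pvLevels]
    have hmemo1 : ∀ q ∈ (pvLevels mn rest).headD PySem.Set.empty,
        (h.foldl (fun nxt q =>
          nxt.insert q (if ab.1 ≤ q.1 ∧ ab.2 ≤ q.2 then
            memo.getD q 0 + memo.getD (q.1 - ab.1, q.2 - ab.2) 0 else memo.getD q 0))
          PySem.Dict.empty).getD q 0 = pvStep g ab q := by
      intro q hq
      have hqh : q ∈ h := by rwa [hL, List.headD_cons] at hq
      rw [pv_dict_build, if_pos hqh]
      have hqE : q ∈ pvExpand ((pvLevels mn rest).headD PySem.Set.empty) ab :=
        pv_mem_expand_self hq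
      show _ = g q + _
      split_ifs with hg
      · rw [hmemo q (hhead ▸ hqE),
          hmemo _ (hhead ▸ pv_mem_expand_shift' hq hg.1 hg.2)]
      · rw [hmemo q (hhead ▸ hqE)]
        ring
    have := ih (pvStep g ab)
      (h.foldl (fun nxt q =>
        nxt.insert q (if ab.1 ≤ q.1 ∧ ab.2 ≤ q.2 then
          memo.getD q 0 + memo.getD (q.1 - ab.1, q.2 - ab.2) 0 else memo.getD q 0))
        PySem.Dict.empty) hmemo1
    rw [hL, List.tail_cons] at this
    exact this

-- ===== VERDICT (by name: the statement is the Claim_ definition above) =====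
theorem two_dimension_limited_spec : Claim_equal_two_dimension_limited := by
  intro m n nums _ hpre
  obtain ⟨hm, hn, hoks⟩ := hpre
  unfold Spec_two_dimension_limited two_dimension_limited two_dimension_limited_alt
  have hA := pv_a_side hm hn nums
    (pvSet2 (List.replicate (m + 1).toNat (List.replicate (n + 1).toNat 0)) 0 0 1) pvInit
    (fun p hp => hoks p hp)
    (pv_shape_set2 pv_shape_zeros 0 0 1)
    (by
      intro q hq
      unfold pvInit
      rw [if_neg]
      intro he
      apply hq
      rw [he]
      exact ⟨le_rfl, hm, le_rfl, hn⟩)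
    (fun i j h1 h2 h3 h4 => pv_dp1_cells hm hn i j h1 h2 h3 h4)
    m n hm le_rfl hn le_rfl
  have hBr := pv_bridge hm hn nums (fun p hp => hoks p hp) (m, n) hm le_rfl hn le_rfl
  have hlev := pv_levels_eq (m, n) nums
  have hmemo0 : ∀ q ∈ (pvLevels (m, n) nums).headD PySem.Set.empty,
      (((pvLevels (m, n) nums).headD PySem.Set.empty).foldl
        (fun d q => d.insert q (if q = (0, 0) then 1 else 0)) PySem.Dict.empty).getD q 0 = pvInit q := by
    intro q hq
    rw [pv_dict_build (fun q => if q = (0, 0) then 1 else 0), if_pos hq]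
    rfl
  have hB := pv_b_value (m, n) nums pvInit _ hmemo0
  simp only [hlev]
  rw [hA, hBr, ← hB]
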